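-- pv_equiv track=rewrite | github.com/aws-samples/data-perimeter-helper | data_perimeter_helper/referential/organization_tree.py | get_account_org_unit_boundary
-- ===== SOURCE A (Python) =====
-- from typing import (
--     List,
--     Dict,
--     Union,
--     Literal,
--     Optional
-- )
--
-- def get_account_org_unit_boundary(
--     list_parent_id: List[str],
--     org_unit_boundary: Dict[str, List[str]]
-- ) -> List[str]:
--     """Get for a given list of parent IDs, the list of associated
--     OU boundary name"""
--     list_category_name = []
--     for parent_id in list_parent_id:
--         for category_name, org_unit in org_unit_boundary.items():
--             if parent_id in org_unit:
--                 list_category_name.append(category_name)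
--     return list(set(list_category_name))
-- ===== SOURCE B (Python) =====
-- def get_account_org_unit_boundary(
--     list_parent_id,
--     org_unit_boundary
-- ):
--     """Get for a given list of parent IDs, the list of associated
--     OU boundary name.
--
--     Inverted-index rewrite: build a parent_id -> [category_name] index in
--     one pass over the boundary dict, then collect categories per parent,
--     deduplicating on first occurrence. Removes A's inner scan of every
--     org_unit list for every parent ID."""
--     index = {}
--     for category_name, org_unit in org_unit_boundary.items():
--         for parent_id in set(org_unit):
--             index.setdefault(parent_id, []).append(category_name)
--     seen = set()
--     result = []
--     for parent_id in list_parent_id: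
--         for category_name in index.get(parent_id, []):
--             if category_name not in seen:
--                 seen.add(category_name)
--                 result.append(category_name)
--     return result
-- ===== Notes on version B (the rewrite author's own statement) =====
-- stated objective: faster
-- what changed: Replaces A's nested parent-by-category membership scan (and final list(set(...))) with an inverted index parent_id -> categories built once over the dict, then a single pass over the parent IDs with first-occurrence deduplication.
import Mathlib
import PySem

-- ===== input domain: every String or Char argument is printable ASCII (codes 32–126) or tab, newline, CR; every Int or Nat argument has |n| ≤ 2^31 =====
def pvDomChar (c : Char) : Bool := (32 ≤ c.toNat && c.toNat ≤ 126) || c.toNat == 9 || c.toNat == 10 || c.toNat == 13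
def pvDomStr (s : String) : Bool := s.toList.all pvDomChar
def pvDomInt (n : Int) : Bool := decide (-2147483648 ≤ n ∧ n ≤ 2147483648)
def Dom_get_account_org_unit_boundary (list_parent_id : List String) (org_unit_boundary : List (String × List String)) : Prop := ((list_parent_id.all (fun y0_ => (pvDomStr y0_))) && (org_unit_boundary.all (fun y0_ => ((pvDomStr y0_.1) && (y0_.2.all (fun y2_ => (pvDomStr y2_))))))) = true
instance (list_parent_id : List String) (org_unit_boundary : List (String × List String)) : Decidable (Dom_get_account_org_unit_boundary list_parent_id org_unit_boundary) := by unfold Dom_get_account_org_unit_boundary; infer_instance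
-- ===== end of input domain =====

-- B replaces A's nested parent×category membership scan with an inverted index built once (faster);
-- the Python return value is list(set(...)), compared as a set: both ports emit its elements in
-- first-occurrence order of A's scan.

-- ===== PORT A =====
-- for parent_id in list_parent_id: for category_name, org_unit in org_unit_boundary.items():
--   if parent_id in org_unit: list_category_name.append(category_name); return list(set(list_category_name))
-- (list(set(xs)) is ported as PySem.Set.ofList xs: the distinct elements, first occurrences in order)
def get_account_org_unit_boundary (list_parent_id : List String) (org_unit_boundary : List (String × List String)) : List String :=
  let list_category_name :=
    list_parent_id.foldl (fun acc parent_id =>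
      org_unit_boundary.foldl (fun acc2 p =>
        if parent_id ∈ p.2 then acc2 ++ [p.1] else acc2) acc) []
  PySem.Set.ofList list_category_name

-- ===== PORT B =====
-- index = {}; for category_name, org_unit in items: for parent_id in set(org_unit):
--   index.setdefault(parent_id, []).append(category_name)
def pvBuildIndex (org_unit_boundary : List (String × List String)) : PySem.Dict String (List String) :=
  org_unit_boundary.foldl (fun d p =>
    (PySem.Set.ofList p.2).foldl (fun d2 parent_id =>
      d2.modify parent_id [] (fun xs => xs ++ [p.1])) d) PySem.Dict.empty

-- seen = set(); result = []; for parent_id in list_parent_id: for category_name in index.get(parent_id, []):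
--   if category_name not in seen: seen.add(category_name); result.append(category_name); return result
def get_account_org_unit_boundary_alt (list_parent_id : List String) (org_unit_boundary : List (String × List String)) : List String :=
  let index := pvBuildIndex org_unit_boundary
  (list_parent_id.foldl (fun (st : PySem.Set String × List String) parent_id =>
      (index.getD parent_id []).foldl (fun st2 category_name =>
        if category_name ∈ st2.1 then st2
        else (st2.1 ++ [category_name], st2.2 ++ [category_name])) st)
    (PySem.Set.empty, [])).2

-- ===== PRECONDITION & SPEC =====
def Spec_get_account_org_unit_boundary (list_parent_id : List String) (org_unit_boundary : List (String × List String)) (out : List String) : Prop := out = get_account_org_unit_boundary_alt list_parent_id org_unit_boundary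
instance (list_parent_id : List String) (org_unit_boundary : List (String × List String)) (out : List String) : Decidable (Spec_get_account_org_unit_boundary list_parent_id org_unit_boundary out) := by unfold Spec_get_account_org_unit_boundary; infer_instance

-- ===== CLAIM (what is proved, stated in full; the proofs are below) =====
def Claim_equal_get_account_org_unit_boundary : Prop := ∀ (list_parent_id : List String) (org_unit_boundary : List (String × List String)), Dom_get_account_org_unit_boundary list_parent_id org_unit_boundary → Spec_get_account_org_unit_boundary list_parent_id org_unit_boundary (get_account_org_unit_boundary list_parent_id org_unit_boundary)

-- ===== LEMMAS AND PROOFS =====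

-- The matching categories for one parent id, in dict order.
def pvCats (org_unit_boundary : List (String × List String)) (parent_id : String) : List String :=
  (org_unit_boundary.filter (fun p => decide (parent_id ∈ p.2))).map Prod.fst

-- A's inner loop over the dict appends exactly the matching categories.
theorem pvA_inner (ob : List (String × List String)) (pid : String) (acc : List String) :
    ob.foldl (fun acc2 p => if pid ∈ p.2 then acc2 ++ [p.1] else acc2) acc
      = acc ++ pvCats ob pid := by
  induction ob generalizing acc with
  | nil => simp [pvCats]
  | cons p t ih =>
    simp only [List.foldl_cons, pvCats, List.filter_cons]
    by_cases h : pid ∈ p.2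
    · simp [h, ih, pvCats]
    · simp [h, ih, pvCats]

-- A's whole accumulation is the flatMap of matching categories over the parents.
theorem pvA_outer (l : List String) (ob : List (String × List String)) (acc : List String) :
    l.foldl (fun acc pid =>
        ob.foldl (fun acc2 p => if pid ∈ p.2 then acc2 ++ [p.1] else acc2) acc) acc
      = acc ++ l.flatMap (pvCats ob) := by
  induction l generalizing acc with
  | nil => simp
  | cons pid t ih =>
    rw [List.foldl_cons, pvA_inner, ih, List.flatMap_cons, List.append_assoc]

-- Inner index-building loop: appending category c under every key of a Nodup list ys.
theorem pvIdx_inner (ys : List String) (c : String) (d : PySem.Dict String (List String))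
    (pid : String) (hnd : ys.Nodup) :
    (ys.foldl (fun d2 y => d2.modify y [] (fun xs => xs ++ [c])) d).getD pid []
      = d.getD pid [] ++ (if pid ∈ ys then [c] else []) := by
  induction ys generalizing d with
  | nil => simp
  | cons y t ih =>
    simp only [List.foldl_cons]
    rw [ih _ (List.Nodup.of_cons hnd)]
    rw [PySem.Dict.getD_modify]
    by_cases h : pid = y
    · subst h
      have : pid ∉ t := by
        have := List.nodup_cons.mp hnd; exact this.1
      simp [this]
    · simp [h, List.mem_cons]

-- The index lookup returns exactly the matching categories in dict order.
theorem pvIdx_getD (ob : List (String × List String)) (pid : String)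
    (d : PySem.Dict String (List String)) :
    (ob.foldl (fun d p =>
        (PySem.Set.ofList p.2).foldl (fun d2 y => d2.modify y [] (fun xs => xs ++ [p.1])) d) d).getD pid []
      = d.getD pid [] ++ pvCats ob pid := by
  induction ob generalizing d with
  | nil => simp [pvCats]
  | cons p t ih =>
    simp only [List.foldl_cons]
    rw [ih, pvIdx_inner _ _ _ _ (PySem.Set.nodup_ofList p.2)]
    simp only [pvCats, List.filter_cons]
    by_cases h : pid ∈ p.2
    · simp [h, PySem.Set.mem_ofList]
    · simp [h, PySem.Set.mem_ofList]

theorem pvIndex_getD (ob : List (String × List String)) (pid : String) :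
    (pvBuildIndex ob).getD pid [] = pvCats ob pid := by
  unfold pvBuildIndex
  rw [pvIdx_getD]
  simp [PySem.Dict.getD_empty]

-- B's dedup step over one list, run on a state whose seen-set equals its result list,
-- is PySem.Set.update on both components.
theorem pvB_inner (xs : List String) (s : PySem.Set String) :
    xs.foldl (fun st2 c =>
        if c ∈ st2.1 then st2 else (st2.1 ++ [c], st2.2 ++ [c])) (s, s)
      = (PySem.Set.update s xs, PySem.Set.update s xs) := by
  induction xs generalizing s with
  | nil => simp [PySem.Set.update]
  | cons c t ih =>
    simp only [List.foldl_cons, PySem.Set.update_cons]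
    by_cases h : c ∈ s
    · simpa [h, PySem.Set.add, PySem.Set.contains, h] using ih s
    · have : PySem.Set.add s c = s ++ [c] := by
        simp [PySem.Set.add, PySem.Set.contains, h]
      simpa [h, this] using ih (s ++ [c])

-- B's whole loop equals Set.update of the flatMap.
theorem pvB_outer (l : List String) (g : String → List String) (s : PySem.Set String) :
    (l.foldl (fun (st : PySem.Set String × List String) pid =>
        (g pid).foldl (fun st2 c =>
          if c ∈ st2.1 then st2 else (st2.1 ++ [c], st2.2 ++ [c])) st) (s, s))
      = (PySem.Set.update s (l.flatMap g), PySem.Set.update s (l.flatMap g)) := by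
  induction l generalizing s with
  | nil => simp [PySem.Set.update]
  | cons pid t ih =>
    simp only [List.foldl_cons, List.flatMap_cons]
    rw [pvB_inner, ih, PySem.Set.update_append]

-- ===== VERDICT (by name: the statement is the Claim_ definition above) =====
theorem get_account_org_unit_boundary_spec : Claim_equal_get_account_org_unit_boundary := by
  intro l ob _
  unfold Spec_get_account_org_unit_boundary
  unfold get_account_org_unit_boundary get_account_org_unit_boundary_alt
  simp only []
  rw [pvA_outer]
  have hidx : ∀ pid, (pvBuildIndex ob).getD pid [] = pvCats ob pid := pvIndex_getD ob
  have : (l.foldl (fun (st : PySem.Set String × List String) parent_id =>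
      ((pvBuildIndex ob).getD parent_id []).foldl (fun st2 c =>
        if c ∈ st2.1 then st2 else (st2.1 ++ [c], st2.2 ++ [c])) st)
    (PySem.Set.empty, [])) =
    (l.foldl (fun (st : PySem.Set String × List String) parent_id =>
      (pvCats ob parent_id).foldl (fun st2 c =>
        if c ∈ st2.1 then st2 else (st2.1 ++ [c], st2.2 ++ [c])) st)
    (PySem.Set.empty, [])) := by
    congr 1; funext st pid; rw [hidx]
  rw [this]
  have he : (PySem.Set.empty : PySem.Set String) = ([] : List String) := rfl
  rw [he, pvB_outer l (pvCats ob) []]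
  simp [PySem.Set.update_nil_left]
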